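-- pv_equiv track=rewrite | github.com/sembrat/video_downloader | analysis/analysis.py | map_to_codes
-- ===== SOURCE A (Python) =====
-- label_to_code = {
--     "code_academics_legacy": "code_academics_legacy",
--     "code_campus": "code_campus",
--     "code_management": "code_management",
--     "code_international": "code_international",
--     "code_innovation": "code_innovation",
--     "code_social": "code_social",
--     "code_finearts": "code_finearts",
--     "code_athletics": "code_athletics",
--     "code_student": "code_student",
--     "code_value": "code_value",
--     "code_other": "code_other",
--     "code_advertisement": "code_advertisement",
--     "code_brand": "code_brand",
--     "code_industry": "code_industry",
--     "code_atmosphere": "code_atmosphere",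
--     "code_academics": "code_academics",
--     "code_teaching": "code_teaching",
--     "code_research": "code_research",
--     "code_location": "code_location",
--     "code_story": "code_story",
-- }
--
-- def map_to_codes(labels: list[str]) -> tuple[list[str], list[str]]:
--     codes, unknown = [], []
--     for lbl in labels:
--         code = label_to_code.get(lbl)
--         if code:
--             codes.append(code)
--         else:
--             unknown.append(lbl)
--     return sorted(set(codes)), sorted(set(unknown))
-- ===== SOURCE B (Python) =====
-- label_to_code = {
--     "code_academics_legacy": "code_academics_legacy",
--     "code_campus": "code_campus",
--     "code_management": "code_management",
--     "code_international": "code_international",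
--     "code_innovation": "code_innovation",
--     "code_social": "code_social",
--     "code_finearts": "code_finearts",
--     "code_athletics": "code_athletics",
--     "code_student": "code_student",
--     "code_value": "code_value",
--     "code_other": "code_other",
--     "code_advertisement": "code_advertisement",
--     "code_brand": "code_brand",
--     "code_industry": "code_industry",
--     "code_atmosphere": "code_atmosphere",
--     "code_academics": "code_academics",
--     "code_teaching": "code_teaching",
--     "code_research": "code_research",
--     "code_location": "code_location",
--     "code_story": "code_story",
-- }
--
-- def map_to_codes(labels: list[str]) -> tuple[list[str], list[str]]:
--     # Two-pointer merge: walk the sorted labels against the key-sorted dict items,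
--     # skipping adjacent duplicates; no hashing in the scan, unknown ends up sorted.
--     pairs = sorted(label_to_code.items(), key=lambda p: p[0])
--     codes, unknown = [], []
--     j = 0
--     prev = None
--     for lbl in sorted(labels):
--         if lbl == prev:
--             continue
--         prev = lbl
--         while j < len(pairs) and pairs[j][0] < lbl:
--             j += 1
--         if j < len(pairs) and pairs[j][0] == lbl:
--             codes.append(pairs[j][1])
--         else:
--             unknown.append(lbl)
--     return sorted(set(codes)), unknown
-- ===== Notes on version B (the rewrite author's own statement) =====
-- stated objective: alternative
-- what changed: Replaces A's hash-lookup accumulation loop plus two set+sort passes by a two-pointer merge: both the labels and the dict items are sorted once, then a single linear walk skips adjacent duplicates and splits known from unknown by advancing a pointer into the sorted key list, so the unknown list comes out sorted with no final sort and no set.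
import Mathlib
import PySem

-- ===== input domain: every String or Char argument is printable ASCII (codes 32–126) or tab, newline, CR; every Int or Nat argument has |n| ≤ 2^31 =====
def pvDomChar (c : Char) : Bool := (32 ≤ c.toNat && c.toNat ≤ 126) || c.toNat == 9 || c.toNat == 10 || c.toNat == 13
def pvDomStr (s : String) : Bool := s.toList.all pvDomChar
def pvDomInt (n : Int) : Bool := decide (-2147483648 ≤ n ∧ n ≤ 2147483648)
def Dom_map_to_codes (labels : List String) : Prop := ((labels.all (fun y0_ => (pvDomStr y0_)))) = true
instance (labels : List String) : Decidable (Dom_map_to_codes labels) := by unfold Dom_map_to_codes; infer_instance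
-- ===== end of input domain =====

-- B replaces A's hash-lookup loop + two set/sort passes by a two-pointer merge of the
-- sorted labels against the key-sorted dict items (alternative decomposition, same cost).

-- ===== PORT A =====
-- the module-level dict literal (unique keys, insertion order)
def label_to_code : PySem.Dict String String := PySem.Dict.mk [
  ("code_academics_legacy", "code_academics_legacy"),
  ("code_campus", "code_campus"),
  ("code_management", "code_management"),
  ("code_international", "code_international"),
  ("code_innovation", "code_innovation"),
  ("code_social", "code_social"),
  ("code_finearts", "code_finearts"),
  ("code_athletics", "code_athletics"),
  ("code_student", "code_student"),
  ("code_value", "code_value"),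
  ("code_other", "code_other"),
  ("code_advertisement", "code_advertisement"),
  ("code_brand", "code_brand"),
  ("code_industry", "code_industry"),
  ("code_atmosphere", "code_atmosphere"),
  ("code_academics", "code_academics"),
  ("code_teaching", "code_teaching"),
  ("code_research", "code_research"),
  ("code_location", "code_location"),
  ("code_story", "code_story")]

def map_to_codes (labels : List String) : List String × List String :=
  -- codes, unknown = [], []; for lbl in labels: code = label_to_code.get(lbl); if code: ... else: ...
  let acc := labels.foldl (fun (acc : List String × List String) lbl =>
    match PySem.Dict.get? label_to_code lbl with
    | some code => if code ≠ "" then (acc.1 ++ [code], acc.2) else (acc.1, acc.2 ++ [lbl])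
    | none => (acc.1, acc.2 ++ [lbl])) ([], [])
  (PySem.List.sorted (PySem.Set.ofList acc.1) (fun x => x) false,
   PySem.List.sorted (PySem.Set.ofList acc.2) (fun x => x) false)

-- ===== PORT B =====
-- pairs = sorted(label_to_code.items(), key=lambda p: p[0])
def bPairs : List (String × String) :=
  PySem.List.sorted (PySem.Dict.items label_to_code) (fun p => p.1) false

-- while j < len(pairs) and pairs[j][0] < lbl: j += 1
def bAdvance (pairs : List (String × String)) (lbl : String) (j : Nat) : Nat :=
  if h : j < pairs.length then
    if pairs[j].1 < lbl then bAdvance pairs lbl (j + 1) else j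
  else j
termination_by pairs.length - j

-- the for-loop over sorted(labels) with state (codes, unknown, j, prev)
def bLoop (pairs : List (String × String)) :
    List String → List String × List String × Nat × Option String →
    List String × List String × Nat × Option String
  | [], st => st
  | lbl :: rest, (codes, unknown, j, prev) =>
    if some lbl = prev then bLoop pairs rest (codes, unknown, j, prev)
    else
      let j' := bAdvance pairs lbl j
      if h : j' < pairs.length then
        if pairs[j'].1 = lbl then
          bLoop pairs rest (codes ++ [pairs[j'].2], unknown, j', some lbl)
        else
          bLoop pairs rest (codes, unknown ++ [lbl], j', some lbl)
      else
        bLoop pairs rest (codes, unknown ++ [lbl], j', some lbl)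

def map_to_codes_alt (labels : List String) : List String × List String :=
  let st := bLoop bPairs (PySem.List.sorted labels (fun x => x) false) ([], [], 0, none)
  (PySem.List.sorted (PySem.Set.ofList st.1) (fun x => x) false, st.2.1)

-- ===== PRECONDITION & SPEC =====
def Spec_map_to_codes (labels : List String) (out : List String × List String) : Prop := out = map_to_codes_alt labels
instance (labels : List String) (out : List String × List String) : Decidable (Spec_map_to_codes labels out) := by unfold Spec_map_to_codes; infer_instance

-- ===== CLAIM (what is proved, stated in full; the proofs are below) =====
def Claim_equal_map_to_codes : Prop := ∀ (labels : List String), Dom_map_to_codes labels → Spec_map_to_codes labels (map_to_codes labels)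

-- ===== LEMMAS AND PROOFS =====

-- ---- A-side: the accumulation loop is a pair of filters ----

lemma nodup_keys_ltc : (PySem.Dict.keys label_to_code).Nodup := by decide

-- in this dict every value equals its key
lemma diag_ltc : ∀ p ∈ label_to_code.items, p.2 = p.1 := by decide

-- hence get? returns the key itself exactly on contained keys
lemma get?_label_to_code (l : String) :
    PySem.Dict.get? label_to_code l =
      if PySem.Dict.contains label_to_code l then some l else none := by
  by_cases hc : PySem.Dict.contains label_to_code l = true
  · rw [if_pos hc]
    have hk : l ∈ PySem.Dict.keys label_to_code :=
      (PySem.Dict.contains_iff_mem_keys _ _).mp hc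
    obtain ⟨v, hv⟩ : ∃ v, (l, v) ∈ label_to_code.items := by
      simpa [PySem.Dict.keys] using hk
    have h2 : v = l := diag_ltc (l, v) hv
    subst h2
    exact PySem.Dict.get?_of_mem_items _ hv nodup_keys_ltc
  · rw [if_neg hc]
    rw [PySem.Dict.get?_eq_none_iff_contains]
    simpa using hc

lemma contains_ne_empty {l : String} (h : PySem.Dict.contains label_to_code l = true) : l ≠ "" := by
  intro he; subst he; exact absurd h (by decide)

lemma fold_spec (ls : List String) (c u : List String) :
    ls.foldl (fun (acc : List String × List String) lbl =>
      match PySem.Dict.get? label_to_code lbl with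
      | some code => if code ≠ "" then (acc.1 ++ [code], acc.2) else (acc.1, acc.2 ++ [lbl])
      | none => (acc.1, acc.2 ++ [lbl])) (c, u)
    = (c ++ ls.filter (fun l => PySem.Dict.contains label_to_code l),
       u ++ ls.filter (fun l => !PySem.Dict.contains label_to_code l)) := by
  induction ls generalizing c u with
  | nil => simp
  | cons x xs ih =>
    rw [List.foldl_cons, List.filter_cons, List.filter_cons]
    cases h : PySem.Dict.contains label_to_code x with
    | false =>
      have hx : PySem.Dict.get? label_to_code x = none := by
        rw [get?_label_to_code, h]; rfl
      simp only [hx]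
      rw [ih]
      simp
    | true =>
      have hx : PySem.Dict.get? label_to_code x = some x := by
        rw [get?_label_to_code, h]; rfl
      simp only [hx, if_pos (contains_ne_empty h)]
      rw [ih]
      simp

-- ---- B-side: facts about the sorted item list ----

lemma mem_bKeys (l : String) :
    l ∈ bPairs.map (·.1) ↔ PySem.Dict.contains label_to_code l = true := by
  rw [PySem.Dict.contains_iff_mem_keys]
  simp [bPairs, List.mem_map, PySem.List.mem_sorted, PySem.Dict.keys]

lemma diag_bPairs : ∀ p ∈ bPairs, p.2 = p.1 := by
  intro p hp
  exact diag_ltc p ((PySem.List.mem_sorted _ _ _ _).mp hp)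

lemma nodup_bKeys : (bPairs.map (·.1)).Nodup := by
  have hperm : (bPairs.map (·.1)).Perm (PySem.Dict.keys label_to_code) := by
    have := (PySem.List.sorted_perm (PySem.Dict.items label_to_code) (fun p => p.1) false).map (·.1)
    simpa [bPairs, PySem.Dict.keys] using this
  exact hperm.nodup_iff.mpr nodup_keys_ltc

lemma pairwise_lt_bKeys : (bPairs.map (·.1)).Pairwise (· < ·) := by
  have hle : (bPairs.map (·.1)).Pairwise (· ≤ ·) := by
    simpa [bPairs] using
      PySem.List.sorted_map_key_pairwise (PySem.Dict.items label_to_code) (fun p => p.1)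
  exact (hle.and nodup_bKeys).imp (fun h => lt_of_le_of_ne h.1 h.2)

-- ---- the while-loop: advance to the first key ≥ lbl ----

lemma bAdvance_spec (pairs : List (String × String)) (lbl : String) (j : Nat)
    (hj : j ≤ pairs.length)
    (hpre : ∀ i (h : i < pairs.length), i < j → (pairs[i]'h).1 < lbl) :
    j ≤ bAdvance pairs lbl j ∧ bAdvance pairs lbl j ≤ pairs.length ∧
    (∀ i (h : i < pairs.length), i < bAdvance pairs lbl j → (pairs[i]'h).1 < lbl) ∧
    (∀ h : bAdvance pairs lbl j < pairs.length, ¬ (pairs[bAdvance pairs lbl j]'h).1 < lbl) := by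
  induction j using bAdvance.induct pairs lbl with
  | case1 j h hlt ih =>
    rw [bAdvance, dif_pos h, if_pos hlt]
    have hpre' : ∀ i (hi : i < pairs.length), i < j + 1 → (pairs[i]'hi).1 < lbl := by
      intro i hi hij
      rcases Nat.lt_succ_iff_lt_or_eq.mp hij with hij | rfl
      · exact hpre i hi hij
      · exact hlt
    obtain ⟨h1, h2, h3, h4⟩ := ih h hpre'
    exact ⟨Nat.le_of_lt (Nat.lt_of_lt_of_le (Nat.lt_succ_self j) h1), h2, h3, h4⟩
  | case2 j h hlt =>
    rw [bAdvance, dif_pos h, if_neg hlt]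
    exact ⟨le_rfl, Nat.le_of_lt h, hpre, fun _ => hlt⟩
  | case3 j h =>
    rw [bAdvance, dif_neg h]
    exact ⟨le_rfl, hj, hpre, fun hh => absurd hh h⟩

-- if the scan stopped past lbl (or at a different key), lbl is not a key at all
lemma advance_not_mem (pairs : List (String × String)) (lbl : String) (j' : Nat)
    (hsort : (pairs.map (·.1)).Pairwise (· < ·))
    (hbelow : ∀ i (h : i < pairs.length), i < j' → (pairs[i]'h).1 < lbl)
    (hstop : ∀ h : j' < pairs.length, (pairs[j']'h).1 ≠ lbl ∧ ¬ (pairs[j']'h).1 < lbl) :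
    lbl ∉ pairs.map (·.1) := by
  intro hmem
  obtain ⟨p, hp, hpe⟩ := List.mem_map.mp hmem
  obtain ⟨m, hm, hme⟩ := List.getElem_of_mem hp
  have hml : (pairs[m]'hm).1 = lbl := by rw [hme, hpe]
  have hjm : ¬ m < j' := by
    intro hmj
    exact absurd (hbelow m hm hmj) (by rw [hml]; exact lt_irrefl _)
  have hj'm : j' ≤ m := Nat.le_of_not_lt hjm
  have hj'len : j' < pairs.length := Nat.lt_of_le_of_lt hj'm hm
  obtain ⟨hne, hnlt⟩ := hstop hj'len
  rcases Nat.lt_or_eq_of_le hj'm with hlt | rfl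
  · have := List.pairwise_iff_getElem.mp hsort j' m
      (by simpa using hj'len) (by simpa using hm) hlt
    simp only [List.getElem_map] at this
    rw [hml] at this
    exact hnlt this
  · exact hne hml


-- ---- adjacent dedup of a nondecreasing list (proof-side description of the prev-skip) ----

def ddp : Option String → List String → List String
  | _, [] => []
  | prev, x :: r => if some x = prev then ddp prev r else x :: ddp (some x) r

lemma ddp_spec : ∀ (xs : List String) (prev : Option String),
    xs.Pairwise (· ≤ ·) →
    (∀ p, prev = some p → ∀ x ∈ xs, p ≤ x) →
    (ddp prev xs).Pairwise (· < ·) ∧ (∀ y, y ∈ ddp prev xs ↔ y ∈ xs ∧ some y ≠ prev) := by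
  intro xs
  induction xs with
  | nil => intro prev _ _; simp [ddp]
  | cons x r ih =>
    intro prev hs hp
    obtain ⟨hx, hr⟩ := List.pairwise_cons.mp hs
    by_cases hxp : some x = prev
    · rw [ddp, if_pos hxp]
      obtain ⟨h1, h2⟩ := ih prev hr
        (fun p hep y hy => hp p hep y (List.mem_cons_of_mem _ hy))
      refine ⟨h1, fun y => ?_⟩
      rw [h2 y]
      constructor
      · rintro ⟨hy, hne⟩; exact ⟨List.mem_cons_of_mem _ hy, hne⟩
      · rintro ⟨hy, hne⟩
        rcases List.mem_cons.mp hy with rfl | hy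
        · exact absurd hxp hne
        · exact ⟨hy, hne⟩
    · rw [ddp, if_neg hxp]
      obtain ⟨h1, h2⟩ := ih (some x) hr
        (by rintro p hep y hy; cases Option.some.injEq .. ▸ hep; exact hx y hy)
      constructor
      · refine List.pairwise_cons.mpr ⟨?_, h1⟩
        intro y hy
        obtain ⟨hyr, hyne⟩ := (h2 y).mp hy
        exact lt_of_le_of_ne (hx y hyr) (by simpa [eq_comm] using hyne)
      · intro y
        rw [List.mem_cons, h2 y]
        constructor
        · rintro (rfl | ⟨hyr, hyne⟩)
          · exact ⟨List.mem_cons_self, hxp⟩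
          · refine ⟨List.mem_cons_of_mem _ hyr, ?_⟩
            intro hyp
            obtain ⟨p, hep⟩ : ∃ p, prev = some p := ⟨y, hyp.symm⟩
            have hpy : p = y := by rw [hep] at hyp; exact (Option.some.inj hyp.symm)
            have hpx : p ≤ x := hp p hep x List.mem_cons_self
            have hxy : x ≤ y := hx y hyr
            have : x = y := le_antisymm hxy (hpy ▸ hpx)
            exact hyne (by simp [this])
        · rintro ⟨hy, hne⟩
          rcases List.mem_cons.mp hy with rfl | hyr
          · exact Or.inl rfl
          · by_cases hyx : y = x
            · exact Or.inl hyx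
            · exact Or.inr ⟨hyr, by simp [hyx]⟩

-- ---- the main loop: a two-pointer merge computes the two filters over the dedup ----

lemma bLoop_spec : ∀ (rest : List String) (codes unknown : List String) (j : Nat)
    (prev : Option String),
    rest.Pairwise (· ≤ ·) →
    (∀ p, prev = some p → ∀ x ∈ rest, p ≤ x) →
    j ≤ bPairs.length →
    (∀ p, prev = some p → ∀ i (h : i < bPairs.length), i < j → (bPairs[i]'h).1 < p) →
    (prev = none → j = 0) →
    (bLoop bPairs rest (codes, unknown, j, prev)).1 =
        codes ++ (ddp prev rest).filter (fun l => decide (l ∈ bPairs.map (·.1))) ∧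
    (bLoop bPairs rest (codes, unknown, j, prev)).2.1 =
        unknown ++ (ddp prev rest).filter (fun l => !decide (l ∈ bPairs.map (·.1))) := by
  intro rest
  induction rest with
  | nil => intro codes unknown j prev _ _ _ _ _; simp [bLoop, ddp]
  | cons lbl rest ih =>
    intro codes unknown j prev hs hp hj hjinv hnone
    obtain ⟨hhead, hrest⟩ := List.pairwise_cons.mp hs
    by_cases hlp : some lbl = prev
    · rw [bLoop, if_pos hlp, ddp, if_pos hlp]
      exact ih codes unknown j prev hrest
        (fun p hep y hy => hp p hep y (List.mem_cons_of_mem _ hy)) hj hjinv hnone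
    · rw [bLoop, if_neg hlp, ddp, if_neg hlp]
      have hpre : ∀ i (h : i < bPairs.length), i < j → (bPairs[i]'h).1 < lbl := by
        intro i h hij
        cases prev with
        | none => exact absurd hij (by simp [hnone rfl])
        | some p =>
          exact lt_of_lt_of_le (hjinv p rfl i h hij) (hp p rfl lbl List.mem_cons_self)
      obtain ⟨hjj', hj'len, hbelow, hstop⟩ := bAdvance_spec bPairs lbl j hj hpre
      have hrest_hp : ∀ p, (some lbl : Option String) = some p → ∀ x ∈ rest, p ≤ x := by
        rintro p hep x hx; cases Option.some.inj hep; exact hhead x hx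
      have hrest_inv : ∀ p, (some lbl : Option String) = some p →
          ∀ i (h : i < bPairs.length), i < bAdvance bPairs lbl j → (bPairs[i]'h).1 < p := by
        rintro p hep i h hij; cases Option.some.inj hep; exact hbelow i h hij
      by_cases h : bAdvance bPairs lbl j < bPairs.length
      · by_cases heq : (bPairs[bAdvance bPairs lbl j]'h).1 = lbl
        · -- matched: lbl is a key; the appended value equals lbl
          have hmem : lbl ∈ bPairs.map (·.1) :=
            List.mem_map.mpr ⟨bPairs[bAdvance bPairs lbl j]'h, List.getElem_mem _, heq⟩
          have hval : (bPairs[bAdvance bPairs lbl j]'h).2 = lbl := by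
            rw [diag_bPairs _ (List.getElem_mem _), heq]
          rw [dif_pos h, if_pos heq]
          obtain ⟨hc, hu⟩ := ih (codes ++ [(bPairs[bAdvance bPairs lbl j]'h).2]) unknown
            (bAdvance bPairs lbl j) (some lbl) hrest hrest_hp hj'len hrest_inv (by simp)
          rw [hc, hu]
          simp [hmem, hval]
        · -- pointer stopped on a different key: lbl is unknown
          have hnmem : lbl ∉ bPairs.map (·.1) :=
            advance_not_mem bPairs lbl (bAdvance bPairs lbl j) pairwise_lt_bKeys hbelow
              (fun hh => ⟨heq, hstop hh⟩)
          rw [dif_pos h, if_neg heq]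
          obtain ⟨hc, hu⟩ := ih codes (unknown ++ [lbl])
            (bAdvance bPairs lbl j) (some lbl) hrest hrest_hp hj'len hrest_inv (by simp)
          rw [hc, hu]
          simp [hnmem]
      · -- pointer ran off the end: lbl is beyond every key, unknown
        have hnmem : lbl ∉ bPairs.map (·.1) :=
          advance_not_mem bPairs lbl (bAdvance bPairs lbl j) pairwise_lt_bKeys hbelow
            (fun hh => absurd hh h)
        rw [dif_neg h]
        obtain ⟨hc, hu⟩ := ih codes (unknown ++ [lbl])
          (bAdvance bPairs lbl j) (some lbl) hrest hrest_hp hj'len hrest_inv (by simp)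
        rw [hc, hu]
        simp [hnmem]

-- ===== VERDICT (by name: the statement is the Claim_ definition above) =====
theorem map_to_codes_spec : Claim_equal_map_to_codes := by
  intro labels _
  unfold Spec_map_to_codes map_to_codes map_to_codes_alt
  simp only [fold_spec, List.nil_append]
  have hsrt : (PySem.List.sorted labels (fun x => x) false).Pairwise (· ≤ ·) := by
    simpa using PySem.List.sorted_pairwise labels (fun x => x)
  obtain ⟨hc, hu⟩ := bLoop_spec (PySem.List.sorted labels (fun x => x) false) [] [] 0 none
    hsrt (by simp) (Nat.zero_le _) (by simp) (fun _ => rfl)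
  simp only [hc, hu, List.nil_append]
  obtain ⟨hddpw, hddmem⟩ := ddp_spec (PySem.List.sorted labels (fun x => x) false) none
    hsrt (by simp)
  have hddmem' : ∀ y, y ∈ ddp none (PySem.List.sorted labels (fun x => x) false) ↔
      y ∈ labels := by
    intro y; rw [hddmem y]; simp [PySem.List.mem_sorted]
  refine Prod.ext ?_ ?_
  · -- codes: both sides are sorted(set(...)) of membership-equal lists
    apply PySem.List.sorted_eq_sorted_of_perm _ _ _ (fun a b h => h)
    rw [List.perm_ext_iff_of_nodup (PySem.Set.nodup_ofList _) (PySem.Set.nodup_ofList _)]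
    intro a
    simp only [PySem.Set.mem_ofList, List.mem_filter, hddmem' a, ← mem_bKeys, decide_eq_true_eq]
  · -- unknown: the merge output is strictly increasing, so it IS the sorted set
    apply PySem.List.sorted_eq_of_perm_of_pairwise_lt
    · rw [List.perm_ext_iff_of_nodup
        ((List.Pairwise.filter _ hddpw).imp (fun h => ne_of_lt h))
        (PySem.Set.nodup_ofList _)]
      intro a
      simp only [PySem.Set.mem_ofList, List.mem_filter, hddmem' a,
        Bool.not_eq_eq_eq_not, Bool.not_true, decide_eq_false_iff_not, mem_bKeys]
      simp
    · simpa using List.Pairwise.filter _ hddpw
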